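-- pv_equiv track=rewrite | github.com/mun5424/ProgrammingInterviewQuestions | simplecompoundwords.py | simplecompound
-- ===== SOURCE A (Python) =====
-- def isCompound(word, wordset):
--     if not wordset:
--         return False
--     dp = [True] + [False] * len(word)
--     # dp = [T, F, F, T, F, F, T]
--     # 'catcat'
--
--     for i in range(0, len(word)+1):
--         for j in range(0, i):
--             if not dp[j]:
--                 #c, ca
--                 continue
--             if dp[j] and word[j:i] in wordset:
--                 dp[i] = True
--                 break
--     return dp[-1]
--
-- def simplecompound(list):
--
--     list = sorted(list, key=lambda x:len(x))
--
--     compounds = []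
--     simples = []
--
--     wordset = set()
--     for word in list:
--         if isCompound(word, wordset):
--             compounds.append(word)
--         else:
--             simples.append(word)
--         wordset.add(word)
--
--     return compounds
-- ===== SOURCE B (Python) =====
-- # B: per word, instead of a word-break DP table over split points, run an NFA
-- # simulation: scan the word once left to right keeping the set of active partial
-- # matches (seen_word, offset) plus a boundary flag; a completed match re-arms
-- # fresh starts at the next boundary.
-- def _segmentable(w, seen):
--     active = set()
--     boundary = True
--     for c in w:
--         pool = set(active)
--         if boundary:
--             for u in seen:
--                 pool.add((u, 0))
--         nxt = set()
--         comp = False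
--         for (u, k) in pool:
--             if k < len(u) and u[k] == c:
--                 if k + 1 == len(u):
--                     comp = True
--                 else:
--                     nxt.add((u, k + 1))
--         active = nxt
--         boundary = comp
--     return boundary
--
-- def simplecompound(list):
--     out = []
--     seen = set()
--     for w in sorted(list, key=len):
--         if seen and _segmentable(w, seen):
--             out.append(w)
--         seen.add(w)
--     return out
-- ===== Notes on version B (the rewrite author's own statement) =====
-- stated objective: alternative
-- what changed: Per word, A fills a word-break DP table over split points, hashing every substring w[j:i]; B runs an NFA simulation instead: one left-to-right scan of the word maintaining a set of active partial matches (seen word, offset) advanced character by character, with a boundary flag that re-arms fresh word starts, so no substring is ever extracted or hashed.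
import Mathlib
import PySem

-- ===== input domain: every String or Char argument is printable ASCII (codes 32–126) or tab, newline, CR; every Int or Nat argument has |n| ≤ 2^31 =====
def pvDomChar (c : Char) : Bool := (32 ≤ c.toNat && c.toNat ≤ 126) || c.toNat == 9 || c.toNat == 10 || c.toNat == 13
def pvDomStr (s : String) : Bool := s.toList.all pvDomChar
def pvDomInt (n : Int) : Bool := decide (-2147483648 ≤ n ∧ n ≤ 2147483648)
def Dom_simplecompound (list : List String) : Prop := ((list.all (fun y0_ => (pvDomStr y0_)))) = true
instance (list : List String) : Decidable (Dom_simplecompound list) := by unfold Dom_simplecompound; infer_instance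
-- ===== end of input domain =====

-- B replaces A's word-break DP table by an NFA simulation: one scan of the word
-- keeping the set of active partial matches (seen word, offset) plus a boundary
-- flag (objective: alternative).

-- ===== PORT A =====
-- len(s) on a string: a Python int that is a length (≥ 0), ported as Nat.
def pyLen (s : String) : Nat := s.toList.length
-- isCompound: forward dp over prefixes; the inner 'for j … continue/break' loop
-- only ever sets dp[i] to True, so it is the 'any' of its condition.
def isCompoundA (word : String) (wordset : PySem.Set String) : Bool :=
  if wordset.isEmpty then false
  else
    let n := pyLen word
    let dp0 : List Bool := true :: List.replicate n false
    let dp := (List.range (n + 1)).foldl (fun dp i =>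
      if (List.range i).any (fun j =>
          dp.getD j false &&
          PySem.Set.contains wordset (PySem.Str.slice word (some (j : Int)) (some (i : Int))))
      then dp.set i true else dp) dp0
    dp.getD n false   -- dp[-1]; dp has length n+1

def simplecompound (list : List String) : List String :=
  let sortedList := PySem.List.sorted list (fun x => pyLen x) false
  let st := sortedList.foldl
    (fun (st : List String × List String × PySem.Set String) word =>
      let compounds := st.1; let simples := st.2.1; let wordset := st.2.2
      if isCompoundA word wordset
      then (compounds ++ [word], simples, PySem.Set.add wordset word)
      else (compounds, simples ++ [word], PySem.Set.add wordset word))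
    ([], [], [])
  st.1

-- ===== PORT B =====
-- offsets k are Python ints that are always in [0, len u], ported as Nat.
-- the inner 'for (u, k) in pool' loop consumes a set, but its result (a bool
-- 'or' and another set) does not depend on the iteration order.
def innerStep (c : Char) (r : PySem.Set (String × Nat) × Bool) (s : String × Nat) :
    PySem.Set (String × Nat) × Bool :=
  if decide (s.2 < pyLen s.1) && (PySem.Str.pyGet? s.1 (s.2 : Int) == some c) then
    if s.2 + 1 = pyLen s.1 then (r.1, true)
    else (PySem.Set.add r.1 (s.1, s.2 + 1), r.2)
  else r

def charStep (seen : PySem.Set String) (st : PySem.Set (String × Nat) × Bool) (c : Char) :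
    PySem.Set (String × Nat) × Bool :=
  (if st.2 then seen.foldl (fun p u => PySem.Set.add p (u, 0)) st.1 else st.1).foldl
    (innerStep c) ([], false)

def segmentableB (w : String) (seen : PySem.Set String) : Bool :=
  (w.toList.foldl (charStep seen) (([] : PySem.Set (String × Nat)), true)).2

def simplecompound_alt (list : List String) : List String :=
  ((PySem.List.sorted list (fun x => pyLen x) false).foldl
    (fun (st : List String × PySem.Set String) w =>
      (if !st.2.isEmpty && segmentableB w st.2 then st.1 ++ [w] else st.1,
       PySem.Set.add st.2 w))
    ([], [])).1

-- ===== PRECONDITION & SPEC =====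
def Spec_simplecompound (list : List String) (out : List String) : Prop := out = simplecompound_alt list
instance (list : List String) (out : List String) : Decidable (Spec_simplecompound list out) := by unfold Spec_simplecompound; infer_instance

-- ===== CLAIM (what is proved, stated in full; the proofs are below) =====
def Claim_equal_simplecompound : Prop := ∀ (list : List String), Dom_simplecompound list → Spec_simplecompound list (simplecompound list)

-- ===== LEMMAS AND PROOFS =====

-- SegTo w S i: the prefix w[0:i] splits into words of S.
inductive SegTo (w : String) (S : PySem.Set String) : Nat → Prop
  | zero : SegTo w S 0
  | step {j i : Nat} : j < i → i ≤ pyLen w →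
      PySem.Str.slice w (some (j : Int)) (some (i : Int)) ∈ S → SegTo w S j → SegTo w S i

theorem segTo_inv {w : String} {S : PySem.Set String} {i : Nat} (h : SegTo w S i) (hi : 0 < i) :
    ∃ j, j < i ∧ i ≤ pyLen w ∧ SegTo w S j ∧
      PySem.Str.slice w (some (j : Int)) (some (i : Int)) ∈ S := by
  cases h with
  | zero => omega
  | step hlt hle hmem hprev => exact ⟨_, hlt, hle, hprev, hmem⟩

-- ---------- A side: the dp table computes SegTo ----------

theorem length_foldl_setTrue (l : List Nat) (c : List Bool → Nat → Bool) (dp : List Bool) :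
    (l.foldl (fun dp i => if c dp i then dp.set i true else dp) dp).length = dp.length := by
  induction l generalizing dp with
  | nil => rfl
  | cons x xs ih => simp only [List.foldl_cons]; split <;> simp [ih]

theorem getD_set_true (dp : List Bool) (k i : Nat) (hk : k < dp.length) :
    (dp.set k true).getD i false = if i = k then true else dp.getD i false := by
  simp only [List.getD_eq_getElem?_getD, List.getElem?_set]
  split_ifs with h1 h2 h3 <;> first | rfl | omega

def condA (w : String) (S : PySem.Set String) (dp : List Bool) (i : Nat) : Bool :=
  (List.range i).any (fun j =>
    dp.getD j false &&
    PySem.Set.contains S (PySem.Str.slice w (some (j : Int)) (some (i : Int))))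

def stepA (w : String) (S : PySem.Set String) (dp : List Bool) (i : Nat) : List Bool :=
  if condA w S dp i then dp.set i true else dp

def dpA0 (w : String) : List Bool := true :: List.replicate (pyLen w) false

theorem dpA0_getD (w : String) (i : Nat) :
    (dpA0 w).getD i false = decide (i = 0) := by
  cases i <;> simp only [dpA0, List.getD_eq_getElem?_getD, List.getElem?_cons_zero,
    List.getElem?_cons_succ, List.getElem?_replicate, Option.getD_some]
  · simp
  · split <;> simp

theorem length_dpA (w : String) (S : PySem.Set String) (l : List Nat) :
    (l.foldl (stepA w S) (dpA0 w)).length = pyLen w + 1 := by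
  have := length_foldl_setTrue l (condA w S) (dpA0 w)
  simpa [stepA, dpA0] using this

theorem dpA_inv (w : String) (S : PySem.Set String) :
    ∀ m, m ≤ pyLen w + 1 → ∀ i, i ≤ pyLen w →
      (((List.range m).foldl (stepA w S) (dpA0 w)).getD i false = true ↔
        (i = 0 ∨ (i < m ∧ SegTo w S i))) := by
  intro m
  induction m with
  | zero =>
    intro _ i _
    simp only [List.range_zero, List.foldl_nil, dpA0_getD]
    simp
  | succ m ih =>
    intro hm i hi
    have hm' : m ≤ pyLen w := by omega
    rw [List.range_succ, List.foldl_append]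
    set dpm := (List.range m).foldl (stepA w S) (dpA0 w) with hdpm
    have hlen : dpm.length = pyLen w + 1 := length_dpA w S _
    have hget : ∀ j, j < m → (dpm.getD j false = true ↔ SegTo w S j) := by
      intro j hj
      rw [ih (by omega) j (by omega)]
      constructor
      · rintro (rfl | ⟨_, h⟩); exact SegTo.zero; exact h
      · intro h; by_cases hj0 : j = 0
        · exact Or.inl hj0
        · exact Or.inr ⟨hj, h⟩
    have hcond : condA w S dpm m = true ↔ (0 < m ∧ SegTo w S m) := by
      simp only [condA, List.any_eq_true, List.mem_range, Bool.and_eq_true]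
      constructor
      · rintro ⟨j, hj, hdp, hmem⟩
        rw [PySem.Set.contains_iff] at hmem
        exact ⟨by omega, SegTo.step hj hm' hmem ((hget j hj).mp hdp)⟩
      · rintro ⟨hmpos, hseg⟩
        obtain ⟨j, hj, _, hsegj, hmem⟩ := segTo_inv hseg hmpos
        exact ⟨j, hj, (hget j hj).mpr hsegj, (PySem.Set.contains_iff _ _).mpr hmem⟩
    simp only [List.foldl_cons, List.foldl_nil, stepA]
    by_cases hc : condA w S dpm m = true
    · rw [if_pos hc, getD_set_true dpm m i (by omega)]
      obtain ⟨hmpos, hsegm⟩ := hcond.mp hc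
      by_cases him : i = m
      · subst him
        rw [if_pos rfl]
        exact ⟨fun _ => Or.inr ⟨by omega, hsegm⟩, fun _ => rfl⟩
      · rw [if_neg him, ih (by omega) i hi]
        constructor
        · rintro (h0 | ⟨h1, h2⟩); exact Or.inl h0; exact Or.inr ⟨by omega, h2⟩
        · rintro (h0 | ⟨h1, h2⟩); exact Or.inl h0; exact Or.inr ⟨by omega, h2⟩
    · rw [if_neg hc, ih (by omega) i hi]
      by_cases him : i = m
      · constructor
        · rintro (h0 | ⟨h1, _⟩); exact Or.inl h0; exact Or.inr ⟨by omega, by omega⟩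
        · rintro (h0 | ⟨_, h2⟩); exact Or.inl h0
          by_cases hm0 : m = 0
          · exact Or.inl (by omega)
          · exact absurd (hcond.mpr ⟨by omega, him ▸ h2⟩) hc
      · constructor
        · rintro (h0 | ⟨h1, h2⟩); exact Or.inl h0; exact Or.inr ⟨by omega, h2⟩
        · rintro (h0 | ⟨h1, h2⟩); exact Or.inl h0; exact Or.inr ⟨by omega, h2⟩

theorem isCompoundA_iff (w : String) (S : PySem.Set String) (hS : S ≠ []) :
    (isCompoundA w S = true ↔ SegTo w S (pyLen w)) := by
  have hne : S.isEmpty = false := by simp [hS]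
  have hinv := dpA_inv w S (pyLen w + 1) le_rfl (pyLen w) le_rfl
  simp only [dpA0] at hinv
  simp only [isCompoundA, hne, Bool.false_eq_true, if_false]
  constructor
  · intro h
    rcases hinv.mp h with h0 | ⟨_, hseg⟩
    · rw [h0]; exact SegTo.zero
    · exact hseg
  · intro h
    apply hinv.mpr
    by_cases h0 : pyLen w = 0
    · exact Or.inl h0
    · exact Or.inr ⟨by omega, h⟩

-- ---------- B side: the NFA simulation computes SegTo ----------

-- the characters of u match w from position j on, for k characters
def MatchAt (w u : String) (j k : Nat) : Prop :=
  ∀ m, m < k → u.toList[m]? = w.toList[j + m]?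

-- an advanceable NFA state: what the per-character loop iterates over
def PoolP (w : String) (S : PySem.Set String) (i : Nat) (u : String) (k : Nat) : Prop :=
  u ∈ S ∧ k ≤ i ∧ SegTo w S (i - k) ∧ MatchAt w u (i - k) k ∧
    (k = 0 ∨ (1 ≤ k ∧ k < pyLen u))

-- the states kept in 'active' after i characters
def ActiveP (w : String) (S : PySem.Set String) (i : Nat) (u : String) (k : Nat) : Prop :=
  u ∈ S ∧ 1 ≤ k ∧ k ≤ i ∧ k < pyLen u ∧ SegTo w S (i - k) ∧ MatchAt w u (i - k) k

-- the per-state condition of the inner loop, as a Prop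
def Hit (c : Char) (s : String × Nat) : Prop :=
  s.2 < pyLen s.1 ∧ s.1.toList[s.2]? = some c

theorem hit_iff (c : Char) (s : String × Nat) :
    ((decide (s.2 < pyLen s.1) && (PySem.Str.pyGet? s.1 (s.2 : Int) == some c)) = true) ↔
      Hit c s := by
  simp [Hit]

theorem hit_def (c : Char) (s : String × Nat) :
    Hit c s ↔ (s.2 < pyLen s.1 ∧ s.1.toList[s.2]? = some c) := Iff.rfl

theorem slice_eq_iff (w u : String) (j i : Nat) (hji : j ≤ i) (hi : i ≤ pyLen w) :
    (PySem.Str.slice w (some (j : Int)) (some (i : Int)) = u) ↔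
      (pyLen u = i - j ∧ ∀ m, m < i - j → u.toList[m]? = w.toList[j + m]?) := by
  have hsl : (PySem.Str.slice w (some (j : Int)) (some (i : Int))).toList
      = (w.toList.drop j).take (i - j) := by
    simp [PySem.Str.toList_slice, PySem.List.slice_natCast]
  have hLlen : ((w.toList.drop j).take (i - j)).length = i - j := by
    simp only [List.length_take, List.length_drop]
    have : i ≤ w.toList.length := hi
    omega
  have hLget : ∀ m, m < i - j → ((w.toList.drop j).take (i - j))[m]? = w.toList[j + m]? := by
    intro m hm
    rw [List.getElem?_take_of_lt hm, List.getElem?_drop]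
  constructor
  · rintro rfl
    refine ⟨by rw [pyLen, hsl, hLlen], ?_⟩
    intro m hm
    rw [hsl] at *
    exact hLget m hm
  · rintro ⟨hlen, hpt⟩
    apply String.toList_inj.mp
    rw [hsl]
    apply List.ext_getElem?
    intro m
    by_cases hm : m < i - j
    · rw [hLget m hm, hpt m hm]
    · rw [List.getElem?_eq_none (by omega), List.getElem?_eq_none (by rw [← pyLen]; omega)]

theorem pool_mem (seen : PySem.Set String) (active : PySem.Set (String × Nat)) (x : String × Nat) :
    x ∈ seen.foldl (fun p u => PySem.Set.add p (u, 0)) active ↔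
      x ∈ active ∨ ∃ u ∈ seen, x = (u, 0) := by
  induction seen generalizing active with
  | nil => simp
  | cons v vs ih =>
    simp only [List.foldl_cons, ih, PySem.Set.mem_add, List.mem_cons]
    constructor
    · rintro ((h | rfl) | ⟨u, hu, rfl⟩)
      · exact Or.inl h
      · exact Or.inr ⟨v, Or.inl rfl, rfl⟩
      · exact Or.inr ⟨u, Or.inr hu, rfl⟩
    · rintro (h | ⟨u, (rfl | hu), rfl⟩)
      · exact Or.inl (Or.inl h)
      · exact Or.inl (Or.inr rfl)
      · exact Or.inr ⟨u, hu, rfl⟩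

theorem innerFold_snd (c : Char) (l : List (String × Nat))
    (n0 : PySem.Set (String × Nat)) (b0 : Bool) :
    ((l.foldl (innerStep c) (n0, b0)).2 = true) ↔
      (b0 = true ∨ ∃ s ∈ l, Hit c s ∧ s.2 + 1 = pyLen s.1) := by
  induction l generalizing n0 b0 with
  | nil => simp
  | cons s l ih =>
    simp only [List.foldl_cons, innerStep]
    by_cases h : (decide (s.2 < pyLen s.1) && (PySem.Str.pyGet? s.1 (s.2 : Int) == some c)) = true
    · rw [if_pos h]
      rw [hit_iff] at h
      by_cases hcomp : s.2 + 1 = pyLen s.1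
      · rw [if_pos hcomp, ih]
        simp only [List.mem_cons]
        constructor
        · intro _; exact Or.inr ⟨s, Or.inl rfl, h, hcomp⟩
        · intro _; left; trivial
      · rw [if_neg hcomp, ih]
        simp only [List.mem_cons]
        constructor
        · rintro (hb | ⟨t, ht, h1, h2⟩); exact Or.inl hb; exact Or.inr ⟨t, Or.inr ht, h1, h2⟩
        · rintro (hb | ⟨t, (rfl | ht), h1, h2⟩)
          · exact Or.inl hb
          · exact absurd h2 hcomp
          · exact Or.inr ⟨t, ht, h1, h2⟩
    · rw [if_neg h, ih]
      have h' : ¬ Hit c s := fun hh => h ((hit_iff c s).mpr hh)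
      simp only [List.mem_cons]
      constructor
      · rintro (hb | ⟨t, ht, h1, h2⟩); exact Or.inl hb; exact Or.inr ⟨t, Or.inr ht, h1, h2⟩
      · rintro (hb | ⟨t, (rfl | ht), h1, h2⟩)
        · exact Or.inl hb
        · exact absurd h1 h'
        · exact Or.inr ⟨t, ht, h1, h2⟩

theorem innerFold_fst (c : Char) (l : List (String × Nat))
    (n0 : PySem.Set (String × Nat)) (b0 : Bool) (x : String × Nat) :
    (x ∈ (l.foldl (innerStep c) (n0, b0)).1) ↔
      (x ∈ n0 ∨ ∃ s ∈ l, Hit c s ∧ s.2 + 1 ≠ pyLen s.1 ∧ x = (s.1, s.2 + 1)) := by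
  induction l generalizing n0 b0 with
  | nil => simp
  | cons s l ih =>
    simp only [List.foldl_cons, innerStep]
    by_cases h : (decide (s.2 < pyLen s.1) && (PySem.Str.pyGet? s.1 (s.2 : Int) == some c)) = true
    · rw [if_pos h]
      rw [hit_iff] at h
      by_cases hcomp : s.2 + 1 = pyLen s.1
      · rw [if_pos hcomp, ih]
        simp only [List.mem_cons]
        constructor
        · rintro (hn | ⟨t, ht, h1, h2, h3⟩); exact Or.inl hn; exact Or.inr ⟨t, Or.inr ht, h1, h2, h3⟩
        · rintro (hn | ⟨t, (rfl | ht), h1, h2, h3⟩)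
          · exact Or.inl hn
          · exact absurd hcomp h2
          · exact Or.inr ⟨t, ht, h1, h2, h3⟩
      · rw [if_neg hcomp, ih]
        simp only [PySem.Set.mem_add, List.mem_cons]
        constructor
        · rintro (hn | ⟨t, ht, h1, h2, h3⟩)
          · rcases hn with hn | rfl
            · exact Or.inl hn
            · exact Or.inr ⟨s, Or.inl rfl, h, hcomp, rfl⟩
          · exact Or.inr ⟨t, Or.inr ht, h1, h2, h3⟩
        · rintro (hn | ⟨t, (rfl | ht), h1, h2, h3⟩)
          · exact Or.inl (Or.inl hn)
          · exact Or.inl (Or.inr h3)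
          · exact Or.inr ⟨t, ht, h1, h2, h3⟩
    · rw [if_neg h, ih]
      have h' : ¬ Hit c s := fun hh => h ((hit_iff c s).mpr hh)
      simp only [List.mem_cons]
      constructor
      · rintro (hn | ⟨t, ht, h1, h2, h3⟩); exact Or.inl hn; exact Or.inr ⟨t, Or.inr ht, h1, h2, h3⟩
      · rintro (hn | ⟨t, (rfl | ht), h1, h2, h3⟩)
        · exact Or.inl hn
        · exact absurd h1 h'
        · exact Or.inr ⟨t, ht, h1, h2, h3⟩

theorem complete_iff (w : String) (S : PySem.Set String) (i : Nat) (hi : i < pyLen w)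
    (c : Char) (hc : w.toList[i]? = some c) :
    (∃ u k, PoolP w S i u k ∧ k < pyLen u ∧ u.toList[k]? = some c ∧ k + 1 = pyLen u) ↔
      SegTo w S (i + 1) := by
  constructor
  · rintro ⟨u, k, ⟨huS, hki, hseg, hmatch, _⟩, hklt, hget, hcomp⟩
    have hslice : PySem.Str.slice w (some ((i - k : Nat) : Int)) (some ((i + 1 : Nat) : Int)) = u := by
      rw [slice_eq_iff w u (i - k) (i + 1) (by omega) (by omega)]
      refine ⟨by omega, ?_⟩
      intro m hm
      rcases Nat.lt_or_ge m k with hmk | hmk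
      · exact hmatch m hmk
      · have hmk' : m = k := by omega
        rw [hmk', hget, show (i - k) + k = i from by omega, hc]
    exact SegTo.step (by omega) (by omega) (hslice ▸ huS) hseg
  · intro h
    obtain ⟨j, hj, _, hsegj, hmem⟩ := segTo_inv h (by omega)
    obtain ⟨hulen, hupt⟩ :=
      (slice_eq_iff w (PySem.Str.slice w (some (j : Int)) (some ((i + 1 : Nat) : Int)))
        j (i + 1) (by omega) (by omega)).mp rfl
    refine ⟨PySem.Str.slice w (some (j : Int)) (some ((i + 1 : Nat) : Int)), i - j,
      ⟨hmem, by omega, ?_, ?_, ?_⟩, by omega, ?_, by omega⟩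
    · rw [show i - (i - j) = j from by omega]; exact hsegj
    · intro m hm
      rw [show i - (i - j) = j from by omega]
      exact hupt m (by omega)
    · rcases Nat.eq_zero_or_pos (i - j) with h0 | h0
      · exact Or.inl h0
      · exact Or.inr ⟨h0, by omega⟩
    · rw [hupt (i - j) (by omega), show j + (i - j) = i from by omega, hc]

theorem advance_iff (w : String) (S : PySem.Set String) (i : Nat) (_hi : i < pyLen w)
    (c : Char) (hc : w.toList[i]? = some c) (x : String × Nat) :
    (∃ u k, PoolP w S i u k ∧ k < pyLen u ∧ u.toList[k]? = some c ∧ k + 1 ≠ pyLen u ∧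
        x = (u, k + 1)) ↔
      ActiveP w S (i + 1) x.1 x.2 := by
  constructor
  · rintro ⟨u, k, ⟨huS, hki, hseg, hmatch, _⟩, hklt, hget, hncomp, rfl⟩
    show ActiveP w S (i + 1) u (k + 1)
    refine ⟨huS, by omega, by omega, by omega, ?_, ?_⟩
    · rw [show (i + 1) - (k + 1) = i - k from by omega]; exact hseg
    · intro m hm
      rw [show (i + 1) - (k + 1) = i - k from by omega]
      rcases Nat.lt_or_ge m k with hmk | hmk
      · exact hmatch m hmk
      · have hmk' : m = k := by omega
        rw [hmk', hget, show (i - k) + k = i from by omega, hc]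
  · rintro ⟨huS, hk1, hki, hklt, hseg, hmatch⟩
    refine ⟨x.1, x.2 - 1, ⟨huS, by omega, ?_, ?_, ?_⟩, by omega, ?_, by omega, ?_⟩
    · rw [show i - (x.2 - 1) = (i + 1) - x.2 from by omega]; exact hseg
    · intro m hm
      rw [show i - (x.2 - 1) = (i + 1) - x.2 from by omega]
      exact hmatch m (by omega)
    · rcases Nat.eq_zero_or_pos (x.2 - 1) with h0 | h0
      · exact Or.inl h0
      · exact Or.inr ⟨h0, by omega⟩
    · rw [hmatch (x.2 - 1) (by omega), show ((i + 1) - x.2) + (x.2 - 1) = i from by omega, hc]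
    · rw [Prod.ext_iff]
      exact ⟨rfl, by omega⟩

theorem segB_inv (w : String) (S : PySem.Set String) :
    ∀ i, i ≤ pyLen w →
      (∀ x : String × Nat,
        x ∈ ((w.toList.take i).foldl (charStep S) (([] : PySem.Set (String × Nat)), true)).1 ↔
          ActiveP w S i x.1 x.2)
      ∧ (((w.toList.take i).foldl (charStep S) (([] : PySem.Set (String × Nat)), true)).2 = true ↔
          SegTo w S i) := by
  intro i
  induction i with
  | zero =>
    intro _
    constructor
    · intro x
      simp only [List.take_zero, List.foldl_nil, List.not_mem_nil, false_iff, ActiveP]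
      rintro ⟨_, h1, h2, _⟩
      omega
    · simp only [List.take_zero, List.foldl_nil]
      exact ⟨fun _ => SegTo.zero, fun _ => by trivial⟩
  | succ i ih =>
    intro hi1
    have hi : i < pyLen w := by omega
    obtain ⟨ihA, ihB⟩ := ih (by omega)
    have hc : w.toList[i]? = some (w.toList[i]'hi) := List.getElem?_eq_getElem hi
    have htake : w.toList.take (i + 1) = w.toList.take i ++ [w.toList[i]'hi] := by
      rw [List.take_add_one, hc]
      rfl
    rw [htake, List.foldl_append, List.foldl_cons, List.foldl_nil]
    have hpool : ∀ x : String × Nat,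
        (x ∈ (if ((w.toList.take i).foldl (charStep S) (([] : PySem.Set (String × Nat)), true)).2
          then S.foldl (fun p u => PySem.Set.add p (u, 0))
            ((w.toList.take i).foldl (charStep S) (([] : PySem.Set (String × Nat)), true)).1
          else ((w.toList.take i).foldl (charStep S) (([] : PySem.Set (String × Nat)), true)).1)) ↔
          PoolP w S i x.1 x.2 := by
      intro x
      by_cases hb : ((w.toList.take i).foldl (charStep S) (([] : PySem.Set (String × Nat)), true)).2 = true
      · rw [if_pos hb, pool_mem]
        have hsegi : SegTo w S i := ihB.mp hb
        constructor
        · rintro (hx | ⟨u, hu, rfl⟩)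
          · obtain ⟨h1, h2, h3, h4, h5, h6⟩ := (ihA x).mp hx
            exact ⟨h1, h3, h5, h6, Or.inr ⟨h2, h4⟩⟩
          · exact ⟨hu, Nat.zero_le i, hsegi, fun m hm => absurd hm (Nat.not_lt_zero m), Or.inl rfl⟩
        · rintro ⟨h1, h2, h3, h4, (h5 | ⟨h5a, h5b⟩)⟩
          · refine Or.inr ⟨x.1, h1, ?_⟩
            rw [Prod.ext_iff]
            exact ⟨rfl, h5⟩
          · exact Or.inl ((ihA x).mpr ⟨h1, h5a, h2, h5b, h3, h4⟩)
      · rw [if_neg hb]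
        have hnseg : ¬ SegTo w S i := fun hs => hb (ihB.mpr hs)
        constructor
        · intro hx
          obtain ⟨h1, h2, h3, h4, h5, h6⟩ := (ihA x).mp hx
          exact ⟨h1, h3, h5, h6, Or.inr ⟨h2, h4⟩⟩
        · rintro ⟨h1, h2, h3, h4, (h5 | ⟨h5a, h5b⟩)⟩
          · rw [h5, Nat.sub_zero] at h3
            exact absurd h3 hnseg
          · exact (ihA x).mpr ⟨h1, h5a, h2, h5b, h3, h4⟩
    constructor
    · intro x
      simp only [charStep]
      rw [innerFold_fst, ← advance_iff w S i hi (w.toList[i]'hi) hc x]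
      simp only [List.not_mem_nil, false_or]
      constructor
      · rintro ⟨s, hs, h1, h2, h3⟩
        obtain ⟨hk, hg⟩ := (hit_def _ s).mp h1
        exact ⟨s.1, s.2, (hpool s).mp hs, hk, hg, h2, h3⟩
      · rintro ⟨u, k, hP, hk, hg, hne, hx⟩
        exact ⟨(u, k), (hpool (u, k)).mpr hP, (hit_def _ (u, k)).mpr ⟨hk, hg⟩, hne, hx⟩
    · simp only [charStep]
      rw [innerFold_snd, ← complete_iff w S i hi (w.toList[i]'hi) hc]
      simp only [Bool.false_eq_true, false_or]
      constructor
      · rintro ⟨s, hs, h1, h2⟩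
        obtain ⟨hk, hg⟩ := (hit_def _ s).mp h1
        exact ⟨s.1, s.2, (hpool s).mp hs, hk, hg, h2⟩
      · rintro ⟨u, k, hP, hk, hg, hcmp⟩
        exact ⟨(u, k), (hpool (u, k)).mpr hP, (hit_def _ (u, k)).mpr ⟨hk, hg⟩, hcmp⟩

theorem segB_iff (w : String) (S : PySem.Set String) :
    (segmentableB w S = true ↔ SegTo w S (pyLen w)) := by
  have h := (segB_inv w S (pyLen w) le_rfl).2
  rwa [show w.toList.take (pyLen w) = w.toList from List.take_length] at h

theorem word_test_eq (w : String) (S : PySem.Set String) :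
    isCompoundA w S = (!S.isEmpty && segmentableB w S) := by
  by_cases hS : S = []
  · subst hS; simp [isCompoundA]
  · have hne : S.isEmpty = false := by simp [hS]
    rw [hne]
    simp only [Bool.not_false, Bool.true_and]
    exact Bool.eq_iff_iff.mpr ((isCompoundA_iff w S hS).trans (segB_iff w S).symm)

theorem outer_eq (l : List String) (acc simples : List String) (S : PySem.Set String) :
    (l.foldl (fun (st : List String × List String × PySem.Set String) word =>
        if isCompoundA word st.2.2 then (st.1 ++ [word], st.2.1, PySem.Set.add st.2.2 word)
        else (st.1, st.2.1 ++ [word], PySem.Set.add st.2.2 word)) (acc, simples, S)).1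
    = (l.foldl (fun (st : List String × PySem.Set String) w =>
        (if !st.2.isEmpty && segmentableB w st.2 then st.1 ++ [w] else st.1,
         PySem.Set.add st.2 w)) (acc, S)).1 := by
  induction l generalizing acc simples S with
  | nil => rfl
  | cons w ws ih =>
    simp only [List.foldl_cons]
    rw [word_test_eq w S]
    by_cases hc : (!S.isEmpty && segmentableB w S) = true
    · simp only [hc, if_true]
      exact ih (acc ++ [w]) simples (PySem.Set.add S w)
    · simp only [Bool.not_eq_true] at hc
      simp only [hc, Bool.false_eq_true, if_false]
      exact ih acc (simples ++ [w]) (PySem.Set.add S w)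

-- ===== VERDICT (by name: the statement is the Claim_ definition above) =====
theorem simplecompound_spec : Claim_equal_simplecompound := by
  intro l _
  unfold Spec_simplecompound simplecompound simplecompound_alt
  exact outer_eq _ [] [] []
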